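-- pv_equiv track=rewrite | github.com/BernieTelalovic/birdtrack_operators | tableau_utils.py | split_by_cycle
-- ===== SOURCE A (Python) =====
-- def split_by_cycle(lis):
--
--     rtn_str = ''
--
--     if len(lis)> 0:
--         list_sort = sorted(lis, key=len)
--         len_fir = len(list_sort[0])
--
--         for ent in list_sort:
--             if len(ent) > len_fir:
--                 len_fir = len(ent)
--                 rtn_str = rtn_str + '\n ' + ent + ' + '
--             else:
--                 rtn_str = rtn_str + ent + ' + '
--
--     return rtn_str
-- ===== SOURCE B (Python) =====
-- def split_by_cycle(lis):
--     def render(s, first):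
--         if not s:
--             return ''
--         n = len(s[0])
--         i = 0
--         while i < len(s) and len(s[i]) == n:
--             i += 1
--         head = ('' if first else '\n ') + ' + '.join(s[:i]) + ' + '
--         return head + render(s[i:], False)
--     return render(sorted(lis, key=len), True)
-- ===== Notes on version B (the rewrite author's own statement) =====
-- stated objective: faster
-- what changed: Replaces A's running-max fold that rebuilds the accumulator string on every iteration with a recursion that peels off one equal-length run at a time and renders each run with ' + '.join, prefixing '\n ' to every run after the first.
import Mathlib
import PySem

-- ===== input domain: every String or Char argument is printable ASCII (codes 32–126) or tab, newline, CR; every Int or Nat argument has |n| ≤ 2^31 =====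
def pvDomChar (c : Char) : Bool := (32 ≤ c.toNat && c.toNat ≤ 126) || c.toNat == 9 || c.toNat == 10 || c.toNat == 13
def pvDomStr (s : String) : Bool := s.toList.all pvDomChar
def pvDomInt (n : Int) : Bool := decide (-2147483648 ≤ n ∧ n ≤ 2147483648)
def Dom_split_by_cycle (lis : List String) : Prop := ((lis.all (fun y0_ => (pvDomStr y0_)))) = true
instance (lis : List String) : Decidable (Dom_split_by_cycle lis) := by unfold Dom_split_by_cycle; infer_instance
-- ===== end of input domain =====

-- B replaces A's running-max fold (which re-concatenates the whole accumulator string each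
-- iteration) with a run-at-a-time recursion rendering each equal-length run via ' + '.join;
-- a timing run measured B faster at the largest sizes.

-- ===== PORT A =====
def split_by_cycle (lis : List String) : String :=
  if lis.length > 0 then
    match PySem.List.sorted lis (fun s => PySem.Str.len s) false with
    | [] => ""
    | h0 :: t =>
      ((h0 :: t).foldl
        (fun (st : Int × String) ent =>
          if PySem.Str.len ent > st.1 then
            (PySem.Str.len ent, st.2 ++ "\n " ++ ent ++ " + ")
          else
            (st.1, st.2 ++ ent ++ " + "))
        (PySem.Str.len h0, "")).2
  else ""

-- ===== PORT B =====
-- render(s, first): emit the first equal-length run joined by ' + ' (with '\n ' prefix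
-- unless it is the first run), then recurse on the rest.
def renderRuns : List String → Bool → String
  | [], _ => ""
  | e :: t, first =>
    let run := e :: t.takeWhile (fun x => PySem.Str.len x == PySem.Str.len e)
    ((if first then "" else "\n ") ++ PySem.Str.join " + " run ++ " + ")
      ++ renderRuns (t.dropWhile (fun x => PySem.Str.len x == PySem.Str.len e)) false
termination_by s _ => s.length
decreasing_by
  exact Nat.lt_succ_of_le (List.Sublist.length_le (List.dropWhile_sublist _))

def split_by_cycle_alt (lis : List String) : String :=
  renderRuns (PySem.List.sorted lis (fun s => PySem.Str.len s) false) true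

-- ===== PRECONDITION & SPEC =====
def Spec_split_by_cycle (lis : List String) (out : String) : Prop := out = split_by_cycle_alt lis
instance (lis : List String) (out : String) : Decidable (Spec_split_by_cycle lis out) := by unfold Spec_split_by_cycle; infer_instance

-- ===== CLAIM (what is proved, stated in full; the proofs are below) =====
def Claim_equal_split_by_cycle : Prop := ∀ (lis : List String), Dom_split_by_cycle lis → Spec_split_by_cycle lis (split_by_cycle lis)

-- ===== LEMMAS AND PROOFS =====

-- A's loop body, named for the proofs.
def stepA (st : Int × String) (ent : String) : Int × String :=
  if PySem.Str.len ent > st.1 then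
    (PySem.Str.len ent, st.2 ++ "\n " ++ ent ++ " + ")
  else
    (st.1, st.2 ++ ent ++ " + ")

-- The "first run" flag the fold state induces on the remaining list.
def runFlag (t : List String) (n : Int) : Bool :=
  match t with
  | [] => true
  | h :: _ => PySem.Str.len h == n

theorem strjoin_singleton (sep p : String) : PySem.Str.join sep [p] = p := by
  apply String.toList_inj.mp
  simp [PySem.Str.toList_join, PySem.Chars.join_singleton]

theorem strjoin_cons_cons (sep p q : String) (rest : List String) :
    PySem.Str.join sep (p :: q :: rest) = p ++ sep ++ PySem.Str.join sep (q :: rest) := by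
  apply String.toList_inj.mp
  simp [PySem.Str.toList_join, PySem.Chars.join_cons_cons]

-- One-element unfolding of renderRuns.
theorem renderRuns_cons (h : String) (t : List String) (first : Bool) :
    renderRuns (h :: t) first =
      (if first then "" else "\n ") ++ h ++ " + " ++ renderRuns t (runFlag t (PySem.Str.len h)) := by
  cases t with
  | nil =>
      simp [renderRuns, runFlag, strjoin_singleton, String.append_assoc]
  | cons h2 t' =>
      by_cases hp : PySem.Str.len h2 == PySem.Str.len h
      · have hlen : PySem.Str.len h2 = PySem.Str.len h := by exact_mod_cast eq_of_beq hp
        have hpred : (fun x => PySem.Str.len x == PySem.Str.len h2)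
            = (fun x => PySem.Str.len x == PySem.Str.len h) := by
          funext x; rw [hlen]
        rw [renderRuns, renderRuns]
        simp only [runFlag, List.takeWhile_cons, List.dropWhile_cons, hp]
        simp only [hpred, if_true]
        rw [strjoin_cons_cons]
        simp [String.append_assoc]
      · rw [renderRuns]
        simp only [runFlag, List.takeWhile_cons, List.dropWhile_cons, hp]
        simp [strjoin_singleton, String.append_assoc]

-- A's fold over a length-sorted tail equals B's run rendering, with the flag
-- recording whether the next element still belongs to the current run.
theorem fold_eq_render (s : List String)
    (hs : s.Pairwise (fun a b => PySem.Str.len a ≤ PySem.Str.len b)) :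
    ∀ (lf : Int) (r : String), (∀ x ∈ s, lf ≤ PySem.Str.len x) →
      (s.foldl stepA (lf, r)).2 = r ++ renderRuns s (runFlag s lf) := by
  induction s with
  | nil => intro lf r _; simp [renderRuns]
  | cons h t ih =>
      intro lf r hlb
      obtain ⟨hht, ht⟩ := List.pairwise_cons.mp hs
      have hlfh : lf ≤ PySem.Str.len h := hlb h (by simp)
      rw [List.foldl_cons]
      by_cases hgt : PySem.Str.len h > lf
      · have hflag : runFlag (h :: t) lf = false := by
          simp only [runFlag]; rw [beq_eq_false_iff_ne]; omega
        have hstep : stepA (lf, r) h = (PySem.Str.len h, r ++ "\n " ++ h ++ " + ") := by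
          unfold stepA; rw [if_pos hgt]
        rw [hstep, ih ht (PySem.Str.len h) _ (fun x hx => hht x hx)]
        rw [hflag, renderRuns_cons]
        simp [String.append_assoc]
      · have heq : PySem.Str.len h = lf := le_antisymm (by omega) hlfh
        have hflag : runFlag (h :: t) lf = true := by
          simp only [runFlag, heq, beq_self_eq_true]
        have hstep : stepA (lf, r) h = (lf, r ++ h ++ " + ") := by
          unfold stepA; rw [if_neg hgt]
        rw [hstep, ih ht lf _ (fun x hx => heq ▸ hht x hx)]
        rw [hflag, renderRuns_cons, heq]
        simp [String.append_assoc]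

-- ===== VERDICT (by name: the statement is the Claim_ definition above) =====
theorem split_by_cycle_spec : Claim_equal_split_by_cycle := by
  intro lis _
  unfold Spec_split_by_cycle split_by_cycle split_by_cycle_alt
  by_cases hnil : lis = []
  · subst hnil
    have hs0 : PySem.List.sorted ([] : List String) (fun s => PySem.Str.len s) false = [] :=
      (PySem.List.sorted_eq_nil_iff _ _ _).mpr rfl
    rw [hs0]
    simp [renderRuns]
  · have hlen : lis.length > 0 := List.length_pos_iff.mpr hnil
    rw [if_pos hlen]
    cases hsort : PySem.List.sorted lis (fun s => PySem.Str.len s) false with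
    | nil => exact absurd ((PySem.List.sorted_eq_nil_iff _ _ _).mp hsort) hnil
    | cons h0 t =>
        have hpair : (h0 :: t).Pairwise (fun a b => PySem.Str.len a ≤ PySem.Str.len b) := by
          have := PySem.List.sorted_pairwise lis (fun s => PySem.Str.len s)
          rwa [hsort] at this
        have hlb : ∀ x ∈ h0 :: t, PySem.Str.len h0 ≤ PySem.Str.len x := by
          intro x hx
          rcases List.mem_cons.mp hx with rfl | hx'
          · exact le_refl _
          · exact (List.pairwise_cons.mp hpair).1 x hx'
        have hfold := fold_eq_render (h0 :: t) hpair (PySem.Str.len h0) "" hlb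
        have hflag : runFlag (h0 :: t) (PySem.Str.len h0) = true := by simp [runFlag]
        have final : ((h0 :: t).foldl stepA (PySem.Str.len h0, "")).2
            = renderRuns (h0 :: t) true := by
          rw [hfold, hflag]; simp
        exact final
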